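-- pv_equiv track=rewrite | github.com/zVictorium/FIB-Manager | src/app/core/validator.py | count_dead_hours
-- ===== SOURCE A (Python) =====
-- from typing import Dict, List, Tuple, Set, Any, Iterator, FrozenSet, Optional
--
-- def count_dead_hours(slots: Dict[Tuple[int, int], List[str]]) -> int:
--     """
--     Count the number of dead hours in a schedule.
--     A dead hour is an hour without classes between two hours with classes on the same day.
--
--     Optimized version using set operations for faster computation.
--
--     Args:
--         slots: Dictionary mapping (day, hour) slots to lists of subjects
--
--     Returns:
--         Total number of dead hours across all days
--     """
--     if not slots:
--         return 0
--
--     # Group slots by day using a dict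
--     days_hours: Dict[int, List[int]] = {}
--     for (day, hour), subjects in slots.items():
--         if subjects:  # Only count hours with actual classes
--             days_hours.setdefault(day, []).append(hour)
--
--     dead_hours = 0
--     for hours in days_hours.values():
--         if len(hours) < 2:
--             continue
--         # Optimized: use min/max and set membership instead of sorting
--         hours_set = set(hours)
--         first_class = min(hours)
--         last_class = max(hours)
--         # Count gaps using range and set difference
--         expected_count = last_class - first_class + 1
--         dead_hours += expected_count - len(hours_set)
--
--     return dead_hours
-- ===== SOURCE B (Python) =====
-- def count_dead_hours(slots):
--     """Same result as A: per day, sum the gaps between consecutive distinct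
--     class hours of the sorted hour set, instead of the (max-min+1)-len(set)
--     closed form."""
--     days = {}
--     for (day, hour), subjects in slots.items():
--         if subjects:
--             days.setdefault(day, set()).add(hour)
--     total = 0
--     for hs in days.values():
--         u = sorted(hs)
--         for a, b in zip(u, u[1:]):
--             total += b - a - 1
--     return total
-- ===== Notes on version B (the rewrite author's own statement) =====
-- stated objective: alternative
-- what changed: B groups the class hours of each day into a set directly and sums the gaps b-a-1 between consecutive hours of the sorted hour set, instead of A's per-day closed form (max-min+1)-len(set) over an hour list.
import Mathlib
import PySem

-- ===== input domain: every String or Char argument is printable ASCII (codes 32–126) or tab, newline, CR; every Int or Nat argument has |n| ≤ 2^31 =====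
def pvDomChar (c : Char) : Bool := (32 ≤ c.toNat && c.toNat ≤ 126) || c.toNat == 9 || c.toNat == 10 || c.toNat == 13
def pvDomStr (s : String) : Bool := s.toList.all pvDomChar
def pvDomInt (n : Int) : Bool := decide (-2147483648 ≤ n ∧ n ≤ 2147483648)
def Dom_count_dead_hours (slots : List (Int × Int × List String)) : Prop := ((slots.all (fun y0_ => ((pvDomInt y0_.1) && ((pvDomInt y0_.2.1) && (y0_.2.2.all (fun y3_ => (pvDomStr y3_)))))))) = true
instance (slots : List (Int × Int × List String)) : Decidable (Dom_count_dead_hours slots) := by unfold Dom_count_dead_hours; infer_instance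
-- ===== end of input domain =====

-- B replaces A's per-day closed form (max-min+1) - len(set) by summing the gaps
-- between consecutive hours of the sorted per-day hour set (objective: alternative).

-- ===== PORT A =====
-- literal port of Source A: group class hours per day with setdefault+append
-- (= Dict.modify day [] (· ++ [hour])), then per day, when it has ≥ 2 entries,
-- add (max - min + 1) - len(set(hours)); the min/max .getD 0 defaults are never
-- taken (the guard shows hours nonempty).
def count_dead_hours (slots : List (Int × Int × List String)) : Int :=
  if slots = [] then 0
  else
    ((slots.foldl
        (fun d s => if s.2.2 ≠ [] then d.modify s.1 [] (· ++ [s.2.1]) else d)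
        PySem.Dict.empty :
      PySem.Dict Int (List Int)).values).foldl
      (fun acc hours =>
        if hours.length < 2 then acc
        else acc +
          (((PySem.List.max? hours (fun x => x)).getD 0
            - (PySem.List.min? hours (fun x => x)).getD 0 + 1)
           - ((PySem.Set.ofList hours).length : Int)))
      0

-- ===== PORT B =====
-- literal port of Source B: group per-day hour SETS (setdefault(day, set()).add(hour)
-- = Dict.modify day Set.empty (Set.add · hour)); per day, sum b - a - 1 over
-- consecutive pairs of the sorted hour set (zip(u, u[1:]) = u.zip u.tail,
-- u[1:] = tail by PySem.List.slice_from_one).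
def count_dead_hours_alt (slots : List (Int × Int × List String)) : Int :=
  ((slots.foldl
      (fun d s =>
        if s.2.2 ≠ [] then d.modify s.1 PySem.Set.empty (fun st => PySem.Set.add st s.2.1)
        else d)
      PySem.Dict.empty :
    PySem.Dict Int (PySem.Set Int)).values).foldl
    (fun total hs =>
      ((PySem.List.sorted hs (fun x => x) false).zip
        (PySem.List.sorted hs (fun x => x) false).tail).foldl
        (fun t p => t + (p.2 - p.1 - 1)) total)
    0

-- ===== PRECONDITION & SPEC =====
def Spec_count_dead_hours (slots : List (Int × Int × List String)) (out : Int) : Prop := out = count_dead_hours_alt slots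
instance (slots : List (Int × Int × List String)) (out : Int) : Decidable (Spec_count_dead_hours slots out) := by unfold Spec_count_dead_hours; infer_instance

-- ===== CLAIM (what is proved, stated in full; the proofs are below) =====
def Claim_equal_count_dead_hours : Prop := ∀ (slots : List (Int × Int × List String)), Dom_count_dead_hours slots → Spec_count_dead_hours slots (count_dead_hours slots)

-- ===== LEMMAS AND PROOFS =====

-- B's grouping loop, per key: the set grown by repeated .add is Set.update of the filtered hours.
theorem getD_foldl_modify_add (pl : List (Int × Int)) (d : PySem.Dict Int (PySem.Set Int)) (k : Int) :
    (pl.foldl (fun d p => d.modify p.1 [] (fun st => PySem.Set.add st p.2)) d).getD k []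
      = PySem.Set.update (d.getD k []) ((pl.filter (fun p => p.1 == k)).map (·.2)) := by
  induction pl generalizing d with
  | nil => simp [PySem.Set.update]
  | cons p t ih =>
      simp only [List.foldl_cons, ih, List.filter_cons]
      by_cases hk : p.1 = k
      · simp [hk, PySem.Set.update]
      · have hne : (p.1 == k) = false := by simp [hk]
        simp [hne, PySem.Dict.getD_modify, Ne.symm hk]

-- telescoping: the sum of (b - a - 1) over consecutive pairs of x :: rest
theorem gap_telescope (rest : List Int) (x : Int) :
    (((x :: rest).zip rest).map (fun p => p.2 - p.1 - 1)).sum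
      = (x :: rest).getLast (by simp) - x - rest.length := by
  induction rest generalizing x with
  | nil => simp
  | cons y t ih =>
      have h1 : ((x :: y :: t).zip (y :: t)) = (x, y) :: ((y :: t).zip t) := rfl
      have h2 : (x :: y :: t).getLast (by simp) = (y :: t).getLast (by simp) :=
        List.getLast_cons (by simp)
      rw [h1, List.map_cons, List.sum_cons, ih y, h2]
      simp only [List.length_cons]
      push_cast
      ring

-- in a ≤-sorted nonempty list every element is at most the last one
theorem pairwise_le_getLast (u : List Int) (hne : u ≠ []) (hp : u.Pairwise (· ≤ ·)) :
    ∀ y ∈ u, y ≤ u.getLast hne := by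
  induction u with
  | nil => cases hne rfl
  | cons a t ih =>
      intro y hy
      rcases List.pairwise_cons.mp hp with ⟨ha, ht⟩
      cases t with
      | nil => simp at hy; simp [hy]
      | cons b s =>
          rw [List.getLast_cons (by simp)]
          rcases List.mem_cons.mp hy with rfl | hyt
          · exact ha _ (List.getLast_mem _)
          · exact ih (by simp) ht y hyt

-- MASTER LEMMA: A's per-day closed form equals B's gap sum over the sorted hour set.
theorem per_day (hours : List Int) :
    (if hours.length < 2 then (0 : Int)
     else ((PySem.List.max? hours (fun x => x)).getD 0
            - (PySem.List.min? hours (fun x => x)).getD 0 + 1)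
          - ((PySem.Set.ofList hours).length : Int))
      = (((PySem.List.sorted (PySem.Set.ofList hours) (fun x => x) false).zip
            (PySem.List.sorted (PySem.Set.ofList hours) (fun x => x) false).tail).map
          (fun p => p.2 - p.1 - 1)).sum := by
  set s := PySem.Set.ofList hours with hs
  set u := PySem.List.sorted s (fun x => x) false with hu
  have hperm : u.Perm s := PySem.List.sorted_perm s _ _
  have hpair : u.Pairwise (· ≤ ·) := PySem.List.sorted_pairwise s (fun x => x)
  have hmem : ∀ y, y ∈ u ↔ y ∈ hours := by
    intro y; rw [hperm.mem_iff, hs, PySem.Set.mem_ofList]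
  have hlenu : u.length = s.length := hperm.length_eq
  by_cases hlt : hours.length < 2
  · rw [if_pos hlt]
    have hle : u.length ≤ 1 := by
      have h3 : s.length ≤ hours.length := by
        rw [hs]; exact @PySem.Set.length_ofList_le Int _ hours
      omega
    match u, hle with
    | [], _ => simp
    | [x], _ => simp
  · rw [if_neg hlt]
    have hne : hours ≠ [] := by intro h; simp [h] at hlt
    have hune : u ≠ [] := by
      intro h
      rw [h] at hlenu
      simp only [List.length_nil] at hlenu
      obtain ⟨c, hc⟩ := List.exists_mem_of_ne_nil hours hne
      have hcs : c ∈ s := by rw [hs]; exact (PySem.Set.mem_ofList hours c).mpr hc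
      have := List.length_pos_of_mem hcs
      omega
    obtain ⟨x, rest, hx⟩ := List.exists_cons_of_ne_nil hune
    rw [hx] at hpair
    have hmem' : ∀ y, y ∈ x :: rest ↔ y ∈ hours := by rw [← hx]; exact hmem
    obtain ⟨m, hm⟩ : ∃ m, PySem.List.min? hours (fun x => x) = some m := by
      cases hmin : PySem.List.min? hours (fun x : Int => x) with
      | none => exact absurd ((PySem.List.min?_eq_none_iff _ _).mp hmin) hne
      | some m => exact ⟨m, rfl⟩
    obtain ⟨M, hM⟩ : ∃ M, PySem.List.max? hours (fun x => x) = some M := by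
      cases hmax : PySem.List.max? hours (fun x : Int => x) with
      | none => exact absurd ((PySem.List.max?_eq_none_iff _ _).mp hmax) hne
      | some M => exact ⟨M, rfl⟩
    have hmin_eq : m = x := by
      have h1 : m ≤ x := PySem.List.min?_isMin hm x ((hmem' x).mp (by simp))
      have h2 : x ≤ m := by
        have hmu : m ∈ x :: rest := (hmem' m).mpr (PySem.List.min?_mem hm)
        rcases List.mem_cons.mp hmu with rfl | hmr
        · exact le_refl _
        · exact (List.pairwise_cons.mp hpair).1 m hmr
      omega
    have hmax_eq : M = (x :: rest).getLast (by simp) := by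
      have h1 : (x :: rest).getLast (by simp) ≤ M :=
        PySem.List.max?_isMax hM _ ((hmem' _).mp (List.getLast_mem _))
      have h2 : M ≤ (x :: rest).getLast (by simp) :=
        pairwise_le_getLast (x :: rest) (by simp) hpair M
          ((hmem' M).mpr (PySem.List.max?_mem hM))
      omega
    have hslen : (s.length : Int) = (rest.length : Int) + 1 := by
      rw [← hlenu, hx]; simp
    rw [hm, hM, Option.getD_some, Option.getD_some, hmin_eq, hmax_eq, hslen, hx]
    have htail : (x :: rest).tail = rest := rfl
    rw [htail, gap_telescope rest x]
    ring

-- ===== VERDICT (by name: the statement is the Claim_ definition above) =====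
theorem count_dead_hours_spec : Claim_equal_count_dead_hours := by
  intro slots _
  unfold Spec_count_dead_hours count_dead_hours count_dead_hours_alt
  by_cases hnil : slots = []
  · subst hnil; simp [PySem.Dict.empty, PySem.Dict.values]
  rw [if_neg hnil]
  -- reduce both grouping loops to folds over the (day, hour) pairs of the kept slots
  set l := slots.filter (fun s => decide (s.2.2 ≠ [])) with hl
  set pl := l.map (fun s => (s.1, s.2.1)) with hpl
  have hA : slots.foldl (fun d s => if s.2.2 ≠ [] then d.modify s.1 [] (· ++ [s.2.1]) else d)
      (PySem.Dict.empty : PySem.Dict Int (List Int))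
      = pl.foldl (fun d p => d.modify p.1 [] (· ++ [p.2])) PySem.Dict.empty := by
    rw [PySem.List.foldl_ite_eq_foldl_filter, hpl, List.foldl_map]
  have hB : slots.foldl (fun d s =>
        if s.2.2 ≠ [] then d.modify s.1 PySem.Set.empty (fun st => PySem.Set.add st s.2.1) else d)
      (PySem.Dict.empty : PySem.Dict Int (PySem.Set Int))
      = pl.foldl (fun d p => d.modify p.1 [] (fun st => PySem.Set.add st p.2))
          PySem.Dict.empty := by
    rw [PySem.List.foldl_ite_eq_foldl_filter, hpl, List.foldl_map]
    rfl
  rw [hA, hB]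
  set dA := pl.foldl (fun d p => d.modify p.1 [] (· ++ [p.2])) PySem.Dict.empty with hdA
  set dB := pl.foldl (fun d p => d.modify p.1 [] (fun st => PySem.Set.add st p.2))
      PySem.Dict.empty with hdB
  have hkeysA : dA.keys = PySem.Set.update PySem.Dict.empty.keys (pl.map (·.1)) :=
    PySem.Dict.keys_foldl_modify_key pl (·.1) [] (fun _ p => (· ++ [p.2])) PySem.Dict.empty
  have hkeysB : dB.keys = PySem.Set.update PySem.Dict.empty.keys (pl.map (·.1)) :=
    PySem.Dict.keys_foldl_modify_key pl (·.1) [] (fun _ p st => PySem.Set.add st p.2)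
      PySem.Dict.empty
  have hndA : dA.keys.Nodup :=
    PySem.Dict.nodup_keys_foldl_modify_key pl (·.1) [] _ PySem.Dict.empty (by simp)
  have hndB : dB.keys.Nodup :=
    PySem.Dict.nodup_keys_foldl_modify_key pl (·.1) [] _ PySem.Dict.empty (by simp)
  have hkeys : dB.keys = dA.keys := by rw [hkeysA, hkeysB]
  -- per key: dA holds the day's hour list, dB holds exactly its Set.ofList
  have hcontent : ∀ k, dB.getD k [] = PySem.Set.ofList (dA.getD k []) := by
    intro k
    rw [hdA, hdB, getD_foldl_modify_add, PySem.Dict.getD_foldl_modify_append]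
    simp [PySem.Set.update_nil_left]
  -- rewrite both outer folds as sums over the common key list
  rw [PySem.Dict.values_eq_map_keys dA hndA [], PySem.Dict.values_eq_map_keys dB hndB [], hkeys]
  rw [List.foldl_map, List.foldl_map]
  have hcongrA := PySem.List.foldl_congr_mem
      (l := dA.keys) (init := (0 : Int))
      (f := fun (acc : Int) (k : Int) =>
        if (dA.getD k []).length < 2 then acc
        else acc +
          (((PySem.List.max? (dA.getD k []) (fun x => x)).getD 0
            - (PySem.List.min? (dA.getD k []) (fun x => x)).getD 0 + 1)
           - ((PySem.Set.ofList (dA.getD k [])).length : Int)))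
      (g := fun (acc : Int) (k : Int) => acc +
        (if (dA.getD k []).length < 2 then (0 : Int)
         else ((PySem.List.max? (dA.getD k []) (fun x => x)).getD 0
            - (PySem.List.min? (dA.getD k []) (fun x => x)).getD 0 + 1)
          - ((PySem.Set.ofList (dA.getD k [])).length : Int)))
      (by intro acc k _; by_cases h : (dA.getD k []).length < 2 <;> simp [h])
  have hcongrB := PySem.List.foldl_congr_mem
      (l := dA.keys) (init := (0 : Int))
      (f := fun (total : Int) (k : Int) =>
        ((PySem.List.sorted (dB.getD k []) (fun x => x) false).zip
          (PySem.List.sorted (dB.getD k []) (fun x => x) false).tail).foldl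
          (fun t p => t + (p.2 - p.1 - 1)) total)
      (g := fun (total : Int) (k : Int) => total +
        (((PySem.List.sorted (dB.getD k []) (fun x => x) false).zip
            (PySem.List.sorted (dB.getD k []) (fun x => x) false).tail).map
          (fun p => p.2 - p.1 - 1)).sum)
      (by intro acc k _; simp only [PySem.List.foldl_add])
  rw [hcongrA, PySem.List.foldl_add, hcongrB, PySem.List.foldl_add]
  congr 1
  apply congrArg
  apply List.map_congr_left
  intro k _
  rw [hcontent k]
  exact per_day (dA.getD k [])
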